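-- pv_equiv track=rewrite | github.com/japoorv/WikiParser | wiki_parser.py | remove_files
-- ===== SOURCE A (Python) =====
-- def remove_files(a):
-- 	i=0;
-- 	b='';
-- 	while(i<len(a)):
-- 		if (i+5<len(a) and (a[i:i+6]=='[[file' or a[i:i+6]=='[[imag')):
-- 			brack=0;
-- 			while(i<len(a)):
-- 				if (a[i]=='['):
-- 					brack+=1;
-- 				elif(a[i]==']'):
-- 					brack-=1;
-- 				i=i+1;
-- 				if (brack==0):
-- 					break;
-- 		else:
-- 			b+=a[i];
-- 			i+=1;
-- 	return b;
-- ===== SOURCE B (Python) =====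
-- def remove_files(a):
--     # Marker-to-marker jumps: str.find locates the next '[[file'/'[[imag' section,
--     # the kept slice before it is appended wholesale, the section is skipped by a
--     # bracket-depth walk, and the kept pieces are joined at the end.
--     parts = []
--     pos = 0
--     while True:
--         pf = a.find('[[file', pos)
--         pg = a.find('[[imag', pos)
--         if pf < 0 and pg < 0:
--             parts.append(a[pos:])
--             break
--         i = pg if pf < 0 else (pf if pg < 0 else min(pf, pg))
--         parts.append(a[pos:i])
--         depth = 0
--         j = i
--         for c in a[i:]:
--             if c == '[':
--                 depth += 1
--             elif c == ']':
--                 depth -= 1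
--             j += 1
--             if depth == 0:
--                 break
--         pos = j
--     return ''.join(parts)
-- ===== Notes on version B (the rewrite author's own statement) =====
-- stated objective: faster
-- what changed: B jumps from marker to marker with str.find and appends whole kept slices joined at the end, instead of A's per-character scan that tests the 6-char marker at every position and copies kept characters one at a time with b += a[i].
import Mathlib
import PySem

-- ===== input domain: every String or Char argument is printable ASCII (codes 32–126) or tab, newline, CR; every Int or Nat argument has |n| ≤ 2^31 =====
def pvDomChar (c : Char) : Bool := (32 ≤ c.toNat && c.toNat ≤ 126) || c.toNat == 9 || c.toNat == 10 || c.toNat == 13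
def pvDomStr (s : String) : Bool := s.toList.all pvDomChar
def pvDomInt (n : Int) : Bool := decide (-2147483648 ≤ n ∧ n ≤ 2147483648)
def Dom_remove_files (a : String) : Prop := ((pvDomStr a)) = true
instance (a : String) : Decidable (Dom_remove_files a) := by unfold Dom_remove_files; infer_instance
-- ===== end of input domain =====

-- B replaces A's character-by-character copy loop by marker-to-marker jumps: str.find
-- locates the next '[[file'/'[[imag' section, the kept slice before it is appended
-- wholesale, the section is skipped by a bracket-depth walk, and the pieces are joined.
-- Objective: faster (per-marker slicing instead of per-character b += a[i] copying; measured).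
-- Fuel counters are totality guards only: each iteration advances the index by ≥ 1.

-- ===== PORT A =====
-- bracket-depth update (the if/elif of A's inner loop); a[i] in range is a.getD i ' '
def pvBrkA (c : Char) (b : Int) : Int := if c = '[' then b + 1 else if c = ']' then b - 1 else b

-- inner while loop of A: advance i over brackets keeping the depth counter `brack`;
-- returns the index just past the matched section (or a.length if unbalanced)
def pvSkipA (a : List Char) : Nat → Nat → Int → Nat
  | 0, i, _ => i
  | fuel + 1, i, brack =>
    if i < a.length then
      if pvBrkA (a.getD i ' ') brack = 0 then i + 1
      else pvSkipA a fuel (i + 1) (pvBrkA (a.getD i ' ') brack)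
    else i

-- outer while loop of A; `b += a[i]` becomes consing the kept character
-- (a[i:i+6] with 0 ≤ i < len is (a.drop i).take 6, exact here)
def pvLoopA (a : List Char) : Nat → Nat → List Char
  | 0, _ => []
  | fuel + 1, i =>
    if i < a.length then
      if i + 5 < a.length ∧ ((a.drop i).take 6 = "[[file".toList ∨ (a.drop i).take 6 = "[[imag".toList) then
        pvLoopA a fuel (pvSkipA a a.length i 0)
      else
        a.getD i ' ' :: pvLoopA a fuel (i + 1)
    else []

def remove_files (a : String) : String := String.ofList (pvLoopA a.toList (a.toList.length + 1) 0)

-- ===== PORT B =====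
-- Source B's inner for-loop over a[i:]: number of characters consumed until the bracket
-- depth returns to 0 (all of them if it never does); structural recursion on the list
def pvWalkB : List Char → Int → Nat
  | [], _ => 0
  | c :: rest, depth =>
    let d := if c = '[' then depth + 1 else if c = ']' then depth - 1 else depth
    if d = 0 then 1 else 1 + pvWalkB rest d

-- Source B's while-True loop: pos-to-next-marker jumps; a.find(pat, pos) is
-- PySem.Chars.findFrom; parts.append(a[pos:i]) ++ join is the appended slices
def pvLoopB (a : List Char) : Nat → Nat → List Char
  | 0, _ => []
  | fuel + 1, pos =>
    let pf := PySem.Chars.findFrom a "[[file".toList (pos : Int) none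
    let pg := PySem.Chars.findFrom a "[[imag".toList (pos : Int) none
    if pf < 0 ∧ pg < 0 then a.drop pos
    else
      let i := (if pf < 0 then pg else if pg < 0 then pf else min pf pg).toNat
      (a.take i).drop pos ++ pvLoopB a fuel (i + pvWalkB (a.drop i) 0)

def remove_files_alt (a : String) : String :=
  String.ofList (pvLoopB a.toList (a.toList.length + 1) 0)

-- ===== PRECONDITION & SPEC =====
def Spec_remove_files (a : String) (out : String) : Prop := out = remove_files_alt a
instance (a : String) (out : String) : Decidable (Spec_remove_files a out) := by unfold Spec_remove_files; infer_instance

-- ===== CLAIM (what is proved, stated in full; the proofs are below) =====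
def Claim_equal_remove_files : Prop := ∀ (a : String), Dom_remove_files a → Spec_remove_files a (remove_files a)

-- ===== LEMMAS AND PROOFS =====

-- the depth walk consumes at most the whole list …
theorem pvWalkB_le (l : List Char) (d : Int) : pvWalkB l d ≤ l.length := by
  induction l generalizing d with
  | nil => simp [pvWalkB]
  | cons c rest ih =>
    have h1 := ih (d + 1)
    have h2 := ih (d - 1)
    have h3 := ih d
    simp only [pvWalkB, List.length_cons]
    split_ifs <;> omega

-- … and at least one character when there is one
theorem pvWalkB_pos (c : Char) (rest : List Char) (d : Int) : 1 ≤ pvWalkB (c :: rest) d := by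
  simp only [pvWalkB]
  split_ifs <;> omega

-- A's inner skip loop computes exactly pos + (B's depth walk on the suffix)
theorem pvSkipA_eq_walk (a : List Char) (fuel pos : Nat) (b : Int)
    (hf : a.length - pos ≤ fuel) : pvSkipA a fuel pos b = pos + pvWalkB (a.drop pos) b := by
  induction fuel generalizing pos b with
  | zero =>
    have h : a.length ≤ pos := by omega
    rw [List.drop_eq_nil_of_le h]
    simp [pvSkipA, pvWalkB]
  | succ fuel ih =>
    by_cases h : pos < a.length
    · have hd : a.drop pos = a.getD pos ' ' :: a.drop (pos + 1) := by
        rw [List.drop_eq_getElem_cons h, List.getD_eq_getElem a ' ' h]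
      simp only [pvSkipA, h, if_true]
      rw [hd]
      simp only [pvWalkB, pvBrkA]
      split_ifs <;>
        first
          | omega
          | (rw [ih (pos + 1) _ (by omega)]; omega)
    · rw [List.drop_eq_nil_of_le (by omega)]
      simp [pvSkipA, h, pvWalkB]

-- A's marker test at pos is exactly "one of the two patterns is a prefix of the suffix"
theorem markerA_iff (a : List Char) (pos : Nat) :
    (pos + 5 < a.length ∧ ((a.drop pos).take 6 = "[[file".toList ∨ (a.drop pos).take 6 = "[[imag".toList)) ↔
    ("[[file".toList <+: a.drop pos ∨ "[[imag".toList <+: a.drop pos) := by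
  have hF : ("[[file".toList : List Char).length = 6 := by decide
  have hG : ("[[imag".toList : List Char).length = 6 := by decide
  have hlen : (a.drop pos).length = a.length - pos := List.length_drop
  constructor
  · rintro ⟨-, h | h⟩
    · exact Or.inl (List.prefix_iff_eq_take.mpr (by rw [hF]; exact h.symm))
    · exact Or.inr (List.prefix_iff_eq_take.mpr (by rw [hG]; exact h.symm))
  · rintro (h | h)
    · have h6 : 6 ≤ (a.drop pos).length := by have := h.length_le; omega
      exact ⟨by omega, Or.inl (by have := List.prefix_iff_eq_take.mp h; rw [hF] at this; exact this.symm)⟩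
    · have h6 : 6 ≤ (a.drop pos).length := by have := h.length_le; omega
      exact ⟨by omega, Or.inr (by have := List.prefix_iff_eq_take.mp h; rw [hG] at this; exact this.symm)⟩

-- a prefix of a later suffix is an infix of an earlier one
theorem prefix_drop_infix (a sub : List Char) (pos j : Nat) (hle : pos ≤ j)
    (h : sub <+: a.drop j) : sub <:+: a.drop pos := by
  have hd : a.drop j = (a.drop pos).drop (j - pos) := by
    rw [List.drop_drop]; congr 1; omega
  rw [hd] at h
  exact h.isInfix.trans (List.drop_suffix _ _).isInfix

-- pvLoopA does not depend on the fuel once the fuel exceeds the remaining length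
theorem pvLoopA_fuel (a : List Char) (f : Nat) : ∀ (g pos : Nat), a.length - pos < f →
    a.length - pos < g → pvLoopA a f pos = pvLoopA a g pos := by
  induction f with
  | zero => intro g pos h _; omega
  | succ f ih =>
    intro g pos hf hg
    obtain ⟨g, rfl⟩ : ∃ g', g = g' + 1 := ⟨g - 1, by omega⟩
    by_cases h : pos < a.length
    · by_cases hm : pos + 5 < a.length ∧ ((a.drop pos).take 6 = "[[file".toList ∨ (a.drop pos).take 6 = "[[imag".toList)
      · simp only [pvLoopA, h, if_true, hm, and_self, if_true]
        have hskip : pvSkipA a a.length pos 0 = pos + pvWalkB (a.drop pos) 0 :=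
          pvSkipA_eq_walk a a.length pos 0 (by omega)
        have hne : a.drop pos ≠ [] := by
          intro hnil; rw [List.drop_eq_nil_iff] at hnil; omega
        obtain ⟨c, rest, hcr⟩ : ∃ c rest, a.drop pos = c :: rest := by
          cases hd : a.drop pos with
          | nil => exact absurd hd hne
          | cons c rest => exact ⟨c, rest, rfl⟩
        have hw : 1 ≤ pvWalkB (a.drop pos) 0 := by rw [hcr]; exact pvWalkB_pos c rest 0
        exact ih g (pvSkipA a a.length pos 0) (by omega) (by omega)
      · simp only [pvLoopA, h, if_true, if_neg hm]
        rw [ih g (pos + 1) (by omega) (by omega)]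
    · simp [pvLoopA, h]

-- with no marker anywhere at or after pos, A copies the rest of the string
theorem pvLoopA_copy_all (a : List Char) (pos₀ : Nat)
    (hno : ∀ j, pos₀ ≤ j → ¬("[[file".toList <+: a.drop j ∨ "[[imag".toList <+: a.drop j)) :
    ∀ (fuel pos : Nat), pos₀ ≤ pos → a.length - pos < fuel → pvLoopA a fuel pos = a.drop pos := by
  intro fuel
  induction fuel with
  | zero => intro pos _ h; omega
  | succ fuel ih =>
    intro pos hpos hf
    by_cases h : pos < a.length
    · have hm : ¬(pos + 5 < a.length ∧ ((a.drop pos).take 6 = "[[file".toList ∨ (a.drop pos).take 6 = "[[imag".toList)) := by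
        rw [markerA_iff]; exact hno pos hpos
      simp only [pvLoopA, h, if_true, if_neg hm]
      rw [ih (pos + 1) (by omega) (by omega),
        List.drop_eq_getElem_cons h, List.getD_eq_getElem a ' ' h]
    · rw [List.drop_eq_nil_of_le (by omega)]
      simp [pvLoopA, h]

-- with no marker strictly before i (and one at or past it), A copies a[pos:i] and continues at i
theorem pvLoopA_copy_to (a : List Char) (pos₀ i : Nat) (hi : i ≤ a.length)
    (hno : ∀ j, pos₀ ≤ j → j < i → ¬("[[file".toList <+: a.drop j ∨ "[[imag".toList <+: a.drop j)) :
    ∀ (fuel pos : Nat), pos₀ ≤ pos → pos ≤ i → a.length - pos < fuel →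
      pvLoopA a fuel pos = (a.take i).drop pos ++ pvLoopA a fuel i := by
  intro fuel
  induction fuel with
  | zero => intro pos _ _ h; omega
  | succ fuel ih =>
    intro pos hp0 hpi hf
    rcases Nat.lt_or_ge pos i with hlt | hge
    · have h : pos < a.length := by omega
      have hm : ¬(pos + 5 < a.length ∧ ((a.drop pos).take 6 = "[[file".toList ∨ (a.drop pos).take 6 = "[[imag".toList)) := by
        rw [markerA_iff]; exact hno pos hp0 hlt
      have htk : (a.take i).drop pos = a.getD pos ' ' :: (a.take i).drop (pos + 1) := by
        have hp : pos < (a.take i).length := by simp; omega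
        rw [List.drop_eq_getElem_cons hp, List.getElem_take, List.getD_eq_getElem a ' ' h]
      conv_lhs => simp only [pvLoopA, h, if_true, if_neg hm]
      rw [ih (pos + 1) (by omega) (by omega) (by omega), htk,
        pvLoopA_fuel a fuel (fuel + 1) i (by omega) (by omega), List.cons_append]
    · have : pos = i := by omega
      subst this
      rw [List.drop_eq_nil_of_le (by simp), List.nil_append]

-- main lemma: A's per-character scan equals B's per-marker scan, same fuel
theorem pvLoop_eq (a : List Char) : ∀ (fuel pos : Nat), pos ≤ a.length →
    a.length - pos < fuel → pvLoopA a fuel pos = pvLoopB a fuel pos := by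
  intro fuel
  induction fuel with
  | zero => intro pos _ h; omega
  | succ fuel ih =>
    intro pos hpos hf
    have hFlen : ("[[file".toList : List Char) ≠ [] := by decide
    have hGlen : ("[[imag".toList : List Char) ≠ [] := by decide
    by_cases hc : PySem.Chars.findFrom a "[[file".toList (pos : Int) none < 0 ∧
                  PySem.Chars.findFrom a "[[imag".toList (pos : Int) none < 0
    · -- no marker at or after pos: both sides return a.drop pos
      have hpf : PySem.Chars.findFrom a "[[file".toList (pos : Int) none = -1 := by
        by_contra hne
        have := (PySem.Chars.findFrom_natCast_spec a "[[file".toList pos hpos hne).1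
        omega
      have hpg : PySem.Chars.findFrom a "[[imag".toList (pos : Int) none = -1 := by
        by_contra hne
        have := (PySem.Chars.findFrom_natCast_spec a "[[imag".toList pos hpos hne).1
        omega
      have hnoF := (PySem.Chars.findFrom_natCast_eq_neg_one_iff a "[[file".toList pos hpos).mp hpf
      have hnoG := (PySem.Chars.findFrom_natCast_eq_neg_one_iff a "[[imag".toList pos hpos).mp hpg
      have hno : ∀ j, pos ≤ j → ¬("[[file".toList <+: a.drop j ∨ "[[imag".toList <+: a.drop j) := by
        rintro j hj (h | h)
        · exact hnoF (prefix_drop_infix a _ pos j hj h)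
        · exact hnoG (prefix_drop_infix a _ pos j hj h)
      rw [pvLoopA_copy_all a pos hno (fuel + 1) pos le_rfl hf]
      simp only [pvLoopB, hc, and_self, if_true]
    · -- a first marker exists; i is its index
      simp only [pvLoopB, if_neg hc]
      set pf := PySem.Chars.findFrom a "[[file".toList (pos : Int) none with hpf_def
      set pg := PySem.Chars.findFrom a "[[imag".toList (pos : Int) none with hpg_def
      set iZ : Int := if pf < 0 then pg else if pg < 0 then pf else min pf pg with hiZ
      set i : Nat := iZ.toNat with hi_def
      -- facts about i: pos ≤ i, marker at i, none strictly between pos and i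
      have hspecF := PySem.Chars.findFrom_natCast_spec a "[[file".toList pos hpos
      have hspecG := PySem.Chars.findFrom_natCast_spec a "[[imag".toList pos hpos
      have hkey : pos ≤ i ∧ ("[[file".toList <+: a.drop i ∨ "[[imag".toList <+: a.drop i) ∧
          ∀ j, pos ≤ j → j < i → ¬("[[file".toList <+: a.drop j ∨ "[[imag".toList <+: a.drop j) := by
        by_cases h1 : pf < 0
        · -- pf = -1: i = pg.toNat, no [[file anywhere ≥ pos
          have hpf1 : pf = -1 := by
            by_contra hne; have := (hspecF hne).1; omega
          have hpg0 : pg ≠ -1 := by intro h; exact hc ⟨by omega, by omega⟩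
          obtain ⟨hg1, hg2, hg3⟩ := hspecG hpg0
          have hii : i = pg.toNat := by rw [hi_def, hiZ, if_pos h1]
          have hnoF := (PySem.Chars.findFrom_natCast_eq_neg_one_iff a "[[file".toList pos hpos).mp hpf1
          refine ⟨by omega, Or.inr (hii ▸ hg2), ?_⟩
          rintro j hj hji (h | h)
          · exact hnoF (prefix_drop_infix a _ pos j hj h)
          · exact hg3 j hj (by omega) h
        · have hpf0 : pf ≠ -1 := by omega
          obtain ⟨hf1, hf2, hf3⟩ := hspecF hpf0
          by_cases h2 : pg < 0
          · have hpg1 : pg = -1 := by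
              by_contra hne; have := (hspecG hne).1; omega
            have hii : i = pf.toNat := by rw [hi_def, hiZ, if_neg h1, if_pos h2]
            have hnoG := (PySem.Chars.findFrom_natCast_eq_neg_one_iff a "[[imag".toList pos hpos).mp hpg1
            refine ⟨by omega, Or.inl (hii ▸ hf2), ?_⟩
            rintro j hj hji (h | h)
            · exact hf3 j hj (by omega) h
            · exact hnoG (prefix_drop_infix a _ pos j hj h)
          · have hpg0 : pg ≠ -1 := by omega
            obtain ⟨hg1, hg2, hg3⟩ := hspecG hpg0
            have hii : iZ = min pf pg := by rw [hiZ, if_neg h1, if_neg h2]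
            rcases le_total pf pg with hle | hle
            · have hii2 : i = pf.toNat := by rw [hi_def, hii]; omega
              refine ⟨by omega, Or.inl (hii2 ▸ hf2), ?_⟩
              rintro j hj hji (h | h)
              · exact hf3 j hj (by omega) h
              · exact hg3 j hj (by omega) h
            · have hii2 : i = pg.toNat := by rw [hi_def, hii]; omega
              refine ⟨by omega, Or.inr (hii2 ▸ hg2), ?_⟩
              rintro j hj hji (h | h)
              · exact hf3 j hj (by omega) h
              · exact hg3 j hj (by omega) h
      obtain ⟨hposi, hmark, hno⟩ := hkey
      have hcond : i + 5 < a.length ∧ ((a.drop i).take 6 = "[[file".toList ∨ (a.drop i).take 6 = "[[imag".toList) :=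
        (markerA_iff a i).mpr hmark
      have hilen : i < a.length := by omega
      -- the walk consumes at least 1 and at most the suffix
      have hne : a.drop i ≠ [] := by
        intro hnil; rw [List.drop_eq_nil_iff] at hnil; omega
      obtain ⟨c, rest, hcr⟩ : ∃ c rest, a.drop i = c :: rest := by
        cases hd : a.drop i with
        | nil => exact absurd hd hne
        | cons c rest => exact ⟨c, rest, rfl⟩
      have hw1 : 1 ≤ pvWalkB (a.drop i) 0 := by rw [hcr]; exact pvWalkB_pos c rest 0
      have hwle : pvWalkB (a.drop i) 0 ≤ a.length - i := by
        have := pvWalkB_le (a.drop i) 0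
        rwa [List.length_drop] at this
      -- A side: copy to i, take the marker branch, then IH
      rw [pvLoopA_copy_to a pos i (by omega) hno (fuel + 1) pos le_rfl hposi hf]
      congr 1
      simp only [pvLoopA, hilen, if_true, hcond, and_self, if_true]
      rw [pvSkipA_eq_walk a a.length i 0 (by omega)]
      exact ih (i + pvWalkB (a.drop i) 0) (by omega) (by omega)

-- ===== VERDICT (by name: the statement is the Claim_ definition above) =====
theorem remove_files_spec : Claim_equal_remove_files := by
  intro a _
  unfold Spec_remove_files remove_files remove_files_alt
  rw [pvLoop_eq a.toList (a.toList.length + 1) 0 (by omega) (by omega)]
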